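-- pv_equiv track=rewrite | github.com/jmetzz/sandbox-python | src/leetcode/p_1043_partition_array_for_max_sum.py | solve_tabulation_top_down
-- ===== SOURCE A (Python) =====
-- from typing import List
--
-- def solve_tabulation_top_down(arr: List[int], k: int) -> int:
--     n = len(arr)
--     dp = [0] * n
--     dp[0] = 0  # base case
--     for i in range(1, n):
--         cur_max = 0
--         max_value_at_i = 0
--         for j in range(i, i - k, -1):
--             if j < 0:
--                 break
--             cur_max = max(cur_max, arr[j])
--             win_size = i - j + 1
--             cur_sum = cur_max * win_size
--             # dp[j - 1] represents the sub-problem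
--             max_value_at_i = max(max_value_at_i, cur_sum + dp[j - 1])
--         dp[i] = max_value_at_i
--     return dp[-1]
-- ===== SOURCE B (Python) =====
-- def solve_tabulation_top_down(arr, k):
--     # Forward ("push") relaxation: each window start extends rightward and
--     # relaxes the dp entry at its end, instead of A's backward scan per end.
--     # dp[0] stays 0: like A, a lone first element contributes nothing.
--     n = len(arr)
--     dp = [0] * n
--     for j in range(n):
--         prev = dp[j - 1] if j > 0 else 0
--         cur_max = 0
--         for i in range(j, min(n, j + k)):
--             cur_max = max(cur_max, arr[i])
--             if i > 0:
--                 cand = cur_max * (i - j + 1) + prev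
--                 if cand > dp[i]:
--                     dp[i] = cand
--     return dp[-1]
-- ===== Notes on version B (the rewrite author's own statement) =====
-- stated objective: alternative
-- what changed: Replaced A's pull-style DP (for each window end, scan backwards over window starts with a running max and read dp[start-1]) by a push-style DP: each window start extends rightward with a forward running max and relaxes the dp entry at the window's end in place; same O(n*k) cost, different traversal and update direction.
import Mathlib
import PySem

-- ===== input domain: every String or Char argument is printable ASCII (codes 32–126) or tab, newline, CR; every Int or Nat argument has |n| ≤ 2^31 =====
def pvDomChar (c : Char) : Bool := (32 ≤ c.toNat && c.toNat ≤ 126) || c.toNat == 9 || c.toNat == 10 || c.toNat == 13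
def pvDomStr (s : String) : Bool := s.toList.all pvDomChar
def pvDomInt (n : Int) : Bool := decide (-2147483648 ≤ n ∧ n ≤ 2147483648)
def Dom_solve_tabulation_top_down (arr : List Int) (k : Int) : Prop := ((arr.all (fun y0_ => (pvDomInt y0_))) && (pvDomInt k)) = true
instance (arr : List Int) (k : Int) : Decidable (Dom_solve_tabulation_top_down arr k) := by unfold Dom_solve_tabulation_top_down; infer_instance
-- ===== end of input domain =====

-- B replaces A's pull-style DP (per window end, backward scan over starts) with a push-style DP
-- (per window start, forward scan relaxing the dp entry at each window end): an alternative of the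
-- same cost, equal to A on every non-empty list (A raises IndexError on []).

-- ===== PORT A =====
-- the inner 'for j in range(i, i - k, -1): if j < 0: break; ...' loop, as the obvious
-- recursion with early exit (Python's range is lazy, so the break stops the scan there too)
def loopA (arr dp : List Int) (i stop : Int) (j curMax mv : Int) : Int :=
  if h : stop < j then
    if j < 0 then mv
    else
      let curMax' := max curMax (PySem.List.pyGetD arr j 0)
      let winSize := i - j + 1
      let curSum := curMax' * winSize
      let mv' := max mv (curSum + PySem.List.pyGetD dp (j - 1) 0)
      loopA arr dp i stop (j - 1) curMax' mv'
  else mv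
termination_by (j - stop).toNat
decreasing_by omega

def solve_tabulation_top_down (arr : List Int) (k : Int) : Int :=
  let n : Int := (arr.length : Int)
  let dp : List Int := List.replicate arr.length 0
  let dp := PySem.List.pySetD dp 0 0
  let dp := (PySem.List.pyRange 1 n 1).foldl (fun dp i =>
    PySem.List.pySetD dp i (loopA arr dp i (i - k) i 0 0)) dp
  PySem.List.pyGetD dp (-1) 0

-- ===== PORT B =====
def solve_tabulation_top_down_alt (arr : List Int) (k : Int) : Int :=
  let n : Int := (arr.length : Int)
  let dp : List Int := List.replicate arr.length 0
  let dp := (PySem.List.pyRange 0 n 1).foldl (fun dp j =>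
    let prev := if j > 0 then PySem.List.pyGetD dp (j - 1) 0 else 0
    let st := (PySem.List.pyRange j (min n (j + k)) 1).foldl
      (fun (st : Int × List Int) i =>
        let curMax := max st.1 (PySem.List.pyGetD arr i 0)
        let dp' := if i > 0 then
            let cand := curMax * (i - j + 1) + prev
            if cand > PySem.List.pyGetD st.2 i 0 then PySem.List.pySetD st.2 i cand else st.2
          else st.2
        (curMax, dp'))
      ((0 : Int), dp)
    st.2) dp
  PySem.List.pyGetD dp (-1) 0

-- ===== PRECONDITION & SPEC =====
-- Pre_ excludes only the empty list, on which A raises IndexError (dp[0] = 0 on dp = []).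
def Pre_solve_tabulation_top_down (arr : List Int) (k : Int) : Prop := arr ≠ []
instance (arr : List Int) (k : Int) : Decidable (Pre_solve_tabulation_top_down arr k) := by unfold Pre_solve_tabulation_top_down; infer_instance
def pvWitness_solve_tabulation_top_down : List Int × Int := ([1, 15, 7, 9, 2, 5, 10], 3)
def Spec_solve_tabulation_top_down (arr : List Int) (k : Int) (out : Int) : Prop := out = solve_tabulation_top_down_alt arr k
instance (arr : List Int) (k : Int) (out : Int) : Decidable (Spec_solve_tabulation_top_down arr k out) := by unfold Spec_solve_tabulation_top_down; infer_instance

-- ===== CLAIM (what is proved, stated in full; the proofs are below) =====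
def Claim_equal_solve_tabulation_top_down : Prop := ∀ (arr : List Int) (k : Int), Dom_solve_tabulation_top_down arr k → Pre_solve_tabulation_top_down arr k → Spec_solve_tabulation_top_down arr k (solve_tabulation_top_down arr k)

-- ===== LEMMAS AND PROOFS =====

-- max of 0 and arr[s..s+c-1]
def sMax (arr : List Int) (s c : Nat) : Int :=
  (List.range' s c).foldl (fun m t => max m (arr.getD t 0)) 0

-- lowest admissible window start for end m
def loS (k : Int) (m : Nat) : Nat := ((m : Int) - k + 1).toNat

-- the table of subproblem values both programs compute (with A's dp[0] = 0 base)
def tblS (arr : List Int) (k : Int) : Nat → List Int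
  | 0 => []
  | m + 1 =>
    tblS arr k m ++ [if m = 0 then 0 else
      ((List.range' (loS k m) (m + 1 - loS k m)).map
        (fun s => sMax arr s (m + 1 - s) * ((m : Int) - (s : Int) + 1) +
          (if s = 0 then 0 else (tblS arr k m).getD (s - 1) 0))).foldl max 0]

def valS (arr : List Int) (k : Int) (m : Nat) : Int := (tblS arr k (m + 1)).getD m 0

-- candidate value of the window s..m
def gS (arr : List Int) (k : Int) (m s : Nat) : Int :=
  sMax arr s (m + 1 - s) * ((m : Int) - (s : Int) + 1) +
    (if s = 0 then 0 else valS arr k (s - 1))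

-- partial value of entry m once starts < j are processed (B's invariant)
def pvS (arr : List Int) (k : Int) (j m : Nat) : Int :=
  if m = 0 then 0 else
    ((List.range' (loS k m) (min j (m + 1) - loS k m)).map (gS arr k m)).foldl max 0

theorem tblS_length (arr : List Int) (k : Int) : ∀ m, (tblS arr k m).length = m := by
  intro m
  induction m with
  | zero => rfl
  | succ m ih => simp [tblS, ih]

theorem tblS_getD (arr : List Int) (k : Int) :
    ∀ m t, t < m → (tblS arr k m).getD t 0 = valS arr k t := by
  intro m
  induction m with
  | zero => intro t ht; omega
  | succ m ih =>
    intro t ht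
    rcases Nat.lt_or_ge t m with h | h
    · rw [show tblS arr k (m + 1) = tblS arr k m ++ [if m = 0 then 0 else
        ((List.range' (loS k m) (m + 1 - loS k m)).map
          (fun s => sMax arr s (m + 1 - s) * ((m : Int) - (s : Int) + 1) +
            (if s = 0 then 0 else (tblS arr k m).getD (s - 1) 0))).foldl max 0] from rfl]
      rw [List.getD_eq_getElem _ _ (by simp [tblS_length]; omega)]
      rw [List.getElem_append_left (by rw [tblS_length]; omega)]
      rw [← List.getD_eq_getElem _ 0 (by rw [tblS_length]; omega)]
      exact ih t h
    · have : t = m := by omega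
      subst this
      rfl

theorem valS_eq (arr : List Int) (k : Int) (m : Nat) :
    valS arr k m = if m = 0 then 0 else
      ((List.range' (loS k m) (m + 1 - loS k m)).map (gS arr k m)).foldl max 0 := by
  have hx : valS arr k m = (if m = 0 then 0 else
      ((List.range' (loS k m) (m + 1 - loS k m)).map
        (fun s => sMax arr s (m + 1 - s) * ((m : Int) - (s : Int) + 1) +
          (if s = 0 then 0 else (tblS arr k m).getD (s - 1) 0))).foldl max 0) := by
    show (tblS arr k (m + 1)).getD m 0 = _
    rw [show tblS arr k (m + 1) = tblS arr k m ++ [if m = 0 then 0 else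
        ((List.range' (loS k m) (m + 1 - loS k m)).map
          (fun s => sMax arr s (m + 1 - s) * ((m : Int) - (s : Int) + 1) +
            (if s = 0 then 0 else (tblS arr k m).getD (s - 1) 0))).foldl max 0] from rfl]
    rw [List.getD_eq_getElem _ _ (by simp [tblS_length])]
    rw [List.getElem_append_right (by simp [tblS_length])]
    simp [tblS_length]
  rw [hx]
  rcases Nat.eq_zero_or_pos m with h0 | h0
  · simp [h0]
  · have hm : ¬ m = 0 := by omega
    simp only [if_neg hm]
    congr 1
    apply List.map_congr_left
    intro s hs
    rw [List.mem_range'] at hs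
    obtain ⟨hs1, hs2⟩ := hs
    unfold gS
    congr 1
    rcases Nat.eq_zero_or_pos s with hz | hz
    · simp [hz]
    · have hsne : ¬ s = 0 := by omega
      simp only [if_neg hsne]
      have hsm : s - 1 < m := by omega
      exact tblS_getD arr k m (s - 1) hsm

theorem pvS_full (arr : List Int) (k : Int) (j m : Nat) (h : m < j) :
    pvS arr k j m = valS arr k m := by
  rw [valS_eq]
  unfold pvS
  rcases Nat.eq_zero_or_pos m with h0 | h0
  · simp [h0]
  · have : min j (m + 1) = m + 1 := by omega
    rw [this]

theorem pvS_zero (arr : List Int) (k : Int) (m : Nat) : pvS arr k 0 m = 0 := by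
  unfold pvS
  rcases Nat.eq_zero_or_pos m with h0 | h0
  · simp [h0]
  · simp

theorem foldl_max_shift {α : Type} (f : α → Int) :
    ∀ (l : List α) (a b : Int),
      l.foldl (fun m t => max m (f t)) (max a b) = max a (l.foldl (fun m t => max m (f t)) b) := by
  intro l
  induction l with
  | nil => intro a b; rfl
  | cons x l ih =>
    intro a b
    simp only [List.foldl_cons]
    rw [max_assoc]
    exact ih a (max b (f x))

theorem foldl_max_out : ∀ (l : List Int) (a x : Int),
    l.foldl max (max a x) = max (l.foldl max a) x := by
  intro l
  induction l with
  | nil => intro a x; rfl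
  | cons y l ih =>
    intro a x
    simp only [List.foldl_cons]
    rw [max_right_comm]
    exact ih (max a y) x

theorem foldl_max_rev : ∀ (l : List Int) (a : Int),
    l.reverse.foldl max a = l.foldl max a := by
  intro l
  induction l with
  | nil => intro a; rfl
  | cons x l ih =>
    intro a
    simp only [List.reverse_cons, List.foldl_append, List.foldl_cons, List.foldl_nil]
    rw [ih a, ← foldl_max_out]

theorem sMax_left (arr : List Int) (s c : Nat) :
    sMax arr s (c + 1) = max (arr.getD s 0) (sMax arr (s + 1) c) := by
  unfold sMax
  rw [List.range'_succ]
  simp only [List.foldl_cons]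
  rw [show max 0 (arr.getD s 0) = max (arr.getD s 0) 0 from max_comm _ _]
  exact foldl_max_shift (fun t => arr.getD t 0) _ _ _

theorem sMax_right (arr : List Int) (s c : Nat) :
    sMax arr s (c + 1) = max (sMax arr s c) (arr.getD (s + c) 0) := by
  unfold sMax
  rw [List.range'_concat]
  simp

theorem set_map_range {β : Type} (f : Nat → β) (n i : Nat) (v : β) (h : i < n) :
    ((List.range n).map f).set i v = (List.range n).map (fun t => if t = i then v else f t) := by
  apply List.ext_getElem
  · simp
  · intro t ht1 ht2
    simp only [List.length_set, List.length_map, List.length_range] at ht1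
    rcases eq_or_ne t i with he | he
    · subst he
      rw [List.getElem_set_self]
      simp
    · rw [List.getElem_set_ne (by omega)]
      simp [he]

-- A's dp after outer iterations 1..m-1 are done (entry 0 holds valS 0 = 0)
def dpAinv (arr : List Int) (k : Int) (m : Nat) : List Int :=
  (List.range arr.length).map (fun t => if t < m then valS arr k t else 0)

-- B's dp after window starts < j are processed
def dpBinv (arr : List Int) (k : Int) (j : Nat) : List Int :=
  (List.range arr.length).map (pvS arr k j)

-- generic: getD of a mapped range
theorem getD_map_range' {β : Type} (f : Nat → β) (n t : Nat) (d : β) (h : t < n) :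
    ((List.range n).map f).getD t d = f t := by
  rw [List.getD_eq_getElem _ _ (by simp [h])]
  simp

theorem dpAinv_length (arr : List Int) (k : Int) (m : Nat) :
    (dpAinv arr k m).length = arr.length := by
  simp [dpAinv]

-- the inner-loop body of A (lets inlined; definitionally the port's lambda)
def bodyA (arr : List Int) (dp : List Int) (i : Int) : (Int × Int × Bool) → Int → (Int × Int × Bool) :=
  fun st j =>
    if st.2.2 = true then st
    else if j < 0 then (st.1, st.2.1, true)
    else
      (max st.1 (PySem.List.pyGetD arr j 0),
       max st.2.1 (max st.1 (PySem.List.pyGetD arr j 0) * (i - j + 1) + PySem.List.pyGetD dp (j - 1) 0),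
       false)

-- the outer-loop body of A
def stepA (arr : List Int) (k : Int) (dp : List Int) (i : Int) : List Int :=
  PySem.List.pySetD dp i (loopA arr dp i (i - k) i 0 0)

theorem bodyA_absorb (arr dp : List Int) (i : Int) :
    ∀ (l : List Int) (a b : Int), List.foldl (bodyA arr dp i) (a, b, true) l = (a, b, true) := by
  intro l
  induction l with
  | nil => intro a b; rfl
  | cons x l ih =>
    intro a b
    simp only [List.foldl_cons, bodyA, if_pos]
    exact ih a b

theorem bodyA_step (arr dp : List Int) (i a b j : Int) (hj : ¬ j < 0) :
    bodyA arr dp i (a, b, false) j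
      = (max a (PySem.List.pyGetD arr j 0),
         max b (max a (PySem.List.pyGetD arr j 0) * (i - j + 1) + PySem.List.pyGetD dp (j - 1) 0),
         false) := by
  simp [bodyA, hj]

theorem bodyA_break (arr dp : List Int) (i a b j : Int) (hj : j < 0) :
    bodyA arr dp i (a, b, false) j = (a, b, true) := by
  simp [bodyA, hj]

-- the early-exit recursion computes exactly the break-flagged fold over the full range
theorem loopA_eq_fold (arr dp : List Int) (i : Int) :
    ∀ (j stop curMax mv : Int),
      loopA arr dp i stop j curMax mv
        = (List.foldl (bodyA arr dp i) (curMax, mv, false)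
            (PySem.List.pyRange j stop (-1))).2.1 := by
  intro j stop
  induction hw : (j - stop).toNat using Nat.strong_induction_on generalizing j with
  | _ c ihc =>
    intro curMax mv
    by_cases hlt : stop < j
    · rw [PySem.List.pyRange_neg_one_cons hlt]
      by_cases hj0 : j < 0
      · rw [loopA, dif_pos hlt, if_pos hj0]
        simp only [List.foldl_cons]
        rw [bodyA_break arr dp i _ _ _ hj0, bodyA_absorb]
      · rw [loopA, dif_pos hlt, if_neg hj0]
        simp only [List.foldl_cons]
        rw [bodyA_step arr dp i _ _ _ hj0]
        exact ihc ((j - 1) - stop).toNat (by omega) (j - 1) rfl _ _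
    · rw [loopA, dif_neg hlt, PySem.List.pyRange_neg_one_eq_nil (by omega)]
      rfl

theorem innerA_partial (arr : List Int) (k : Int) (m : Nat) (h1 : 1 ≤ m) (h2 : m < arr.length) :
    ∀ c, c ≤ m + 1 →
      List.foldl (bodyA arr (dpAinv arr k m) (m : Int)) ((0 : Int), (0 : Int), false)
          ((List.range c).map (fun t : Nat => (m : Int) - (t : Int)))
        = (sMax arr (m + 1 - c) c,
           (((List.range' (m + 1 - c) c).map (gS arr k m)).reverse).foldl max 0,
           false) := by
  intro c
  induction c with
  | zero => intro _; rfl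
  | succ c ih =>
    intro hc
    rw [List.range_succ, List.map_append, List.foldl_append, ih (by omega)]
    simp only [List.map_cons, List.map_nil, List.foldl_cons, List.foldl_nil]
    rw [bodyA_step arr (dpAinv arr k m) (m : Int) _ _ _ (by omega : ¬ ((m : Int) - (c : Int) < 0))]
    have hgetarr : PySem.List.pyGetD arr ((m : Int) - (c : Int)) 0 = arr.getD (m - c) 0 := by
      rw [show (m : Int) - (c : Int) = ((m - c : Nat) : Int) by omega, PySem.List.pyGetD_natCast]
    have hcm : max (sMax arr (m + 1 - c) c) (PySem.List.pyGetD arr ((m : Int) - (c : Int)) 0)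
        = sMax arr (m - c) (c + 1) := by
      rw [hgetarr, show m + 1 - c = (m - c) + 1 by omega, sMax_left, max_comm]
    have hdget : PySem.List.pyGetD (dpAinv arr k m) ((m : Int) - (c : Int) - 1) 0
        = (if m - c = 0 then 0 else valS arr k (m - c - 1)) := by
      rcases Nat.lt_or_ge c m with hlt | hge
      · rw [show (m : Int) - (c : Int) - 1 = ((m - c - 1 : Nat) : Int) by omega,
            PySem.List.pyGetD_natCast]
        unfold dpAinv
        rw [getD_map_range' _ _ _ _ (by omega)]
        have h1' : m - c - 1 < m := by omega
        have h2' : ¬ (m - c = 0) := by omega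
        simp [h1', h2']
      · have hcm' : c = m := by omega
        subst hcm'
        rw [show (c : Int) - (c : Int) - 1 = -1 by ring]
        have hne : dpAinv arr k c ≠ [] := by
          intro hnil
          have := dpAinv_length arr k c
          rw [hnil] at this
          simp at this
          omega
        rw [PySem.List.pyGetD_neg_one _ _ hne, List.getLast_eq_getElem]
        unfold dpAinv
        simp only [List.getElem_map, List.getElem_range, List.length_map, List.length_range]
        have : ¬ (arr.length - 1 < c) := by omega
        simp [this]
    have hg : max (sMax arr (m + 1 - c) c) (PySem.List.pyGetD arr ((m : Int) - (c : Int)) 0) *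
          ((m : Int) - ((m : Int) - (c : Int)) + 1) +
          PySem.List.pyGetD (dpAinv arr k m) ((m : Int) - (c : Int) - 1) 0
        = gS arr k m (m - c) := by
      rw [hcm, hdget]
      unfold gS
      have e1 : m + 1 - (m - c) = c + 1 := by omega
      have e2 : (m : Int) - ((m - c : Nat) : Int) + 1 = (m : Int) - ((m : Int) - (c : Int)) + 1 := by
        omega
      rw [e1, ← e2]
    rw [hg]
    simp only [Prod.mk.injEq]
    refine ⟨?_, ?_, trivial⟩
    · rw [show m + 1 - (c + 1) = m - c by omega]
      exact hcm
    · rw [show m + 1 - (c + 1) = m - c by omega, List.range'_succ, List.map_cons,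
          List.reverse_cons, List.foldl_append]
      simp only [List.foldl_cons, List.foldl_nil]
      rw [show m - c + 1 = m + 1 - c by omega]

theorem innerA (arr : List Int) (k : Int) (m : Nat) (h1 : 1 ≤ m) (h2 : m < arr.length) :
    ((PySem.List.pyRange (m : Int) ((m : Int) - k) (-1)).foldl
        (bodyA arr (dpAinv arr k m) (m : Int)) ((0 : Int), (0 : Int), false)).2.1
      = valS arr k m := by
  rw [PySem.List.pyRange_neg_one]
  rw [show (m : Int) - ((m : Int) - k) = k by ring]
  rw [valS_eq, if_neg (by omega)]
  by_cases hk0 : k ≤ 0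
  · rw [show k.toNat = 0 by omega]
    simp only [List.range_zero, List.map_nil, List.foldl_nil]
    rw [show m + 1 - loS k m = 0 by unfold loS; omega]
    rfl
  · by_cases hk : k.toNat ≤ m + 1
    · rw [innerA_partial arr k m h1 h2 k.toNat hk]
      show (((List.range' (m + 1 - k.toNat) k.toNat).map (gS arr k m)).reverse).foldl max 0 = _
      rw [foldl_max_rev]
      rw [show loS k m = m + 1 - k.toNat by unfold loS; omega,
          show m + 1 - (m + 1 - k.toNat) = k.toNat by omega]
    · rw [show k.toNat = ((m + 1) + 1) + (k.toNat - (m + 2)) by omega,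
          List.range_add, List.map_append, List.foldl_append,
          List.range_succ, List.map_append, List.foldl_append]
      rw [innerA_partial arr k m h1 h2 (m + 1) (by omega)]
      simp only [List.map_cons, List.map_nil, List.foldl_cons, List.foldl_nil]
      rw [bodyA_break arr (dpAinv arr k m) (m : Int) _ _ _ (by push_cast; omega)]
      rw [bodyA_absorb]
      show (((List.range' (m + 1 - (m + 1)) (m + 1)).map (gS arr k m)).reverse).foldl max 0 = _
      rw [foldl_max_rev]
      rw [show loS k m = 0 by unfold loS; omega,
          show m + 1 - (0 : Nat) = m + 1 by omega,
          show m + 1 - (m + 1) = 0 by omega]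

theorem stepA_inv (arr : List Int) (k : Int) (m : Nat) (h1 : 1 ≤ m) (h2 : m < arr.length) :
    stepA arr k (dpAinv arr k m) (m : Int) = dpAinv arr k (m + 1) := by
  unfold stepA
  rw [loopA_eq_fold, innerA arr k m h1 h2]
  rw [PySem.List.pySetD_natCast]
  unfold dpAinv
  rw [set_map_range _ _ _ _ h2]
  apply List.map_congr_left
  intro t ht
  rw [List.mem_range] at ht
  rcases eq_or_ne t m with he | he
  · subst he
    simp
  · have : (t < m) ↔ (t < m + 1) := by omega
    simp [he, this]

theorem portA_eq (arr : List Int) (k : Int) (h : arr ≠ []) :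
    solve_tabulation_top_down arr k = valS arr k (arr.length - 1) := by
  have hn : 1 ≤ arr.length := List.length_pos_of_ne_nil h
  have hrfl : solve_tabulation_top_down arr k
      = PySem.List.pyGetD
          ((PySem.List.pyRange 1 (arr.length : Int) 1).foldl (stepA arr k)
            (PySem.List.pySetD (List.replicate arr.length (0 : Int)) 0 0)) (-1) 0 := rfl
  rw [hrfl]
  have hinit : PySem.List.pySetD (List.replicate arr.length (0 : Int)) 0 0 = dpAinv arr k 1 := by
    rw [show (0 : Int) = ((0 : Nat) : Int) from rfl, PySem.List.pySetD_natCast]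
    apply List.ext_getElem
    · simp [dpAinv]
    · intro t ht1 ht2
      simp only [List.length_set, List.length_replicate] at ht1
      unfold dpAinv
      simp only [List.getElem_map, List.getElem_range]
      rcases Nat.eq_zero_or_pos t with hz | hz
      · subst hz
        rw [List.getElem_set_self]
        have : valS arr k 0 = 0 := by rw [valS_eq]; simp
        simp [this]
      · rw [List.getElem_set_ne (by omega)]
        simp only [List.getElem_replicate]
        have : ¬ (t < 1) := by omega
        simp [this]
  rw [hinit]
  have houter : ∀ c, c ≤ arr.length - 1 →
      List.foldl (stepA arr k) (dpAinv arr k 1)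
          ((List.range c).map (fun t => ((1 + t : Nat) : Int)))
        = dpAinv arr k (c + 1) := by
    intro c
    induction c with
    | zero => intro _; rfl
    | succ c ihc =>
      intro hc
      rw [List.range_succ, List.map_append, List.foldl_append, ihc (by omega)]
      simp only [List.map_cons, List.map_nil, List.foldl_cons, List.foldl_nil]
      have := stepA_inv arr k (c + 1) (by omega) (by omega)
      rw [show ((1 + c : Nat) : Int) = ((c + 1 : Nat) : Int) by push_cast; ring]
      rw [this]
  have hrange : PySem.List.pyRange 1 (arr.length : Int) 1
      = (List.range (arr.length - 1)).map (fun t => ((1 + t : Nat) : Int)) := by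
    rw [PySem.List.pyRange_one]
    rw [show ((arr.length : Int) - 1).toNat = arr.length - 1 by omega]
    apply List.map_congr_left
    intro t _
    push_cast
    ring
  rw [hrange, houter (arr.length - 1) le_rfl]
  rw [show arr.length - 1 + 1 = arr.length by omega]
  have hne : dpAinv arr k arr.length ≠ [] := by
    intro hnil
    have := dpAinv_length arr k arr.length
    rw [hnil] at this
    simp at this
    omega
  rw [PySem.List.pyGetD_neg_one _ _ hne, List.getLast_eq_getElem]
  unfold dpAinv
  simp only [List.getElem_map, List.getElem_range, List.length_map, List.length_range]
  have : arr.length - 1 < arr.length := by omega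
  simp [this]

-- the inner-loop body of B (lets inlined; definitionally the port's lambda)
def bodyB (arr : List Int) (prev : Int) (j : Int) : (Int × List Int) → Int → (Int × List Int) :=
  fun st i =>
    (max st.1 (PySem.List.pyGetD arr i 0),
     if i > 0 then
       (if max st.1 (PySem.List.pyGetD arr i 0) * (i - j + 1) + prev >
            PySem.List.pyGetD st.2 i 0
        then PySem.List.pySetD st.2 i
              (max st.1 (PySem.List.pyGetD arr i 0) * (i - j + 1) + prev)
        else st.2)
     else st.2)

-- the outer-loop body of B
def stepB (arr : List Int) (k : Int) (dp : List Int) (j : Int) : List Int :=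
  ((PySem.List.pyRange j (min (arr.length : Int) (j + k)) 1).foldl
      (bodyB arr (if j > 0 then PySem.List.pyGetD dp (j - 1) 0 else 0) j) ((0 : Int), dp)).2

theorem dpBinv_length (arr : List Int) (k : Int) (j : Nat) :
    (dpBinv arr k j).length = arr.length := by
  simp [dpBinv]

-- entry m once start j = c has additionally been processed, for m in c's reach
theorem pvS_succ_window (arr : List Int) (k : Int) (c m : Nat) (hm : 1 ≤ m) (hcm : c ≤ m)
    (hk : (m : Int) - k + 1 ≤ (c : Int)) :
    pvS arr k (c + 1) m = max (pvS arr k c m) (gS arr k m c) := by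
  unfold pvS
  rw [if_neg (by omega), if_neg (by omega)]
  have hlo : loS k m ≤ c := by unfold loS; omega
  rw [show min (c + 1) (m + 1) = c + 1 by omega, show min c (m + 1) = c by omega]
  rw [show c + 1 - loS k m = (c - loS k m) + 1 by omega, List.range'_concat]
  rw [List.map_append, List.foldl_append]
  simp only [List.map_cons, List.map_nil, List.foldl_cons, List.foldl_nil]
  rw [show loS k m + 1 * (c - loS k m) = c by omega]

-- entry m is untouched by start j when m is out of j's reach
theorem pvS_succ_out (arr : List Int) (k : Int) (j m : Nat)
    (h : m = 0 ∨ m < j ∨ (j : Int) < (m : Int) - k + 1) :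
    pvS arr k (j + 1) m = pvS arr k j m := by
  rcases h with h0 | hlt | hk
  · simp [pvS, h0]
  · rw [pvS_full arr k (j + 1) m (by omega), pvS_full arr k j m hlt]
  · unfold pvS
    rcases Nat.eq_zero_or_pos m with h0 | h0
    · simp [h0]
    · rw [if_neg (by omega), if_neg (by omega)]
      have hlo : j + 1 ≤ loS k m := by unfold loS; omega
      rw [show min (j + 1) (m + 1) - loS k m = 0 by omega,
          show min j (m + 1) - loS k m = 0 by omega]

def dpBmid (arr : List Int) (k : Int) (c d : Nat) : List Int :=
  (List.range arr.length).map
    (fun m => if c ≤ m ∧ m < c + d then pvS arr k (c + 1) m else pvS arr k c m)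

theorem innerB_partial (arr : List Int) (k : Int) (c : Nat) (hc : c < arr.length)
    (prev : Int) (hprev : prev = if c = 0 then 0 else valS arr k (c - 1)) :
    ∀ d, c + d ≤ arr.length → (d : Int) ≤ max k 0 →
      List.foldl (bodyB arr prev (c : Int)) ((0 : Int), dpBinv arr k c)
          ((List.range d).map (fun t : Nat => ((c + t : Nat) : Int)))
        = (sMax arr c d, dpBmid arr k c d) := by
  intro d
  induction d with
  | zero =>
    intro _ _
    simp only [List.range_zero, List.map_nil, List.foldl_nil]
    unfold dpBinv dpBmid
    simp only [Prod.mk.injEq]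
    refine ⟨by trivial, ?_⟩
    apply List.map_congr_left
    intro m _
    simp
  | succ d ih =>
    intro hlen hk
    rw [List.range_succ, List.map_append, List.foldl_append, ih (by omega) (by omega)]
    simp only [List.map_cons, List.map_nil, List.foldl_cons, List.foldl_nil]
    have hk1 : (0 : Int) < k := by omega
    have harr : PySem.List.pyGetD arr ((c + d : Nat) : Int) 0 = arr.getD (c + d) 0 := by
      rw [PySem.List.pyGetD_natCast]
    have hcm : max (sMax arr c d) (PySem.List.pyGetD arr ((c + d : Nat) : Int) 0)
        = sMax arr c (d + 1) := by
      rw [harr, sMax_right]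
    have hwin : ((c + d : Nat) : Int) - (c : Int) + 1 = (d : Int) + 1 := by push_cast; ring
    unfold bodyB
    simp only []
    rw [hcm, hwin]
    by_cases hi0 : ((c + d : Nat) : Int) > 0
    · have hm1 : 1 ≤ c + d := by omega
      have hgetmid : PySem.List.pyGetD (dpBmid arr k c d) ((c + d : Nat) : Int) 0
          = pvS arr k c (c + d) := by
        rw [PySem.List.pyGetD_natCast]
        unfold dpBmid
        rw [getD_map_range' _ _ _ _ (by omega)]
        simp
      have hcand : sMax arr c (d + 1) * ((d : Int) + 1) + prev = gS arr k (c + d) c := by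
        unfold gS
        rw [hprev]
        congr 1
        rw [show c + d + 1 - c = d + 1 by omega]
        congr 1
        push_cast
        ring
      have hnew : pvS arr k (c + 1) (c + d)
          = max (pvS arr k c (c + d)) (gS arr k (c + d) c) :=
        pvS_succ_window arr k c (c + d) hm1 (by omega) (by push_cast; omega)
      rw [if_pos hi0, hgetmid, hcand]
      simp only [Prod.mk.injEq]
      refine ⟨by trivial, ?_⟩
      by_cases hgt : gS arr k (c + d) c > pvS arr k c (c + d)
      · rw [if_pos hgt, PySem.List.pySetD_natCast]
        unfold dpBmid
        rw [set_map_range _ _ _ _ (by omega)]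
        apply List.map_congr_left
        intro m hm
        rw [List.mem_range] at hm
        rcases eq_or_ne m (c + d) with he | he
        · subst he
          rw [if_pos rfl, if_pos (by omega), hnew]
          omega
        · rw [if_neg he]
          have : (c ≤ m ∧ m < c + d) ↔ (c ≤ m ∧ m < c + (d + 1)) := by omega
          simp only [this]
      · rw [if_neg hgt]
        unfold dpBmid
        apply List.map_congr_left
        intro m hm
        rw [List.mem_range] at hm
        rcases eq_or_ne m (c + d) with he | he
        · subst he
          rw [if_neg (by omega), if_pos (by omega), hnew]
          omega
        · have : (c ≤ m ∧ m < c + d) ↔ (c ≤ m ∧ m < c + (d + 1)) := by omega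
          simp only [this]
    · have hc0 : c = 0 := by omega
      have hd0 : d = 0 := by omega
      subst hc0; subst hd0
      rw [if_neg hi0]
      simp only [Prod.mk.injEq]
      refine ⟨by trivial, ?_⟩
      unfold dpBmid
      apply List.map_congr_left
      intro m hm
      rcases eq_or_ne m 0 with he | he
      · subst he
        have h1 : (0 ≤ 0 ∧ 0 < 0 + (0 + 1)) := by omega
        have h2 : ¬ (0 ≤ 0 ∧ 0 < 0 + 0) := by omega
        rw [if_pos h1, if_neg h2]
        simp [pvS]
      · have : ((0 ≤ m ∧ m < 0 + 0) ↔ (0 ≤ m ∧ m < 0 + (0 + 1))) := by omega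
        simp only [this]

theorem stepB_inv (arr : List Int) (k : Int) (c : Nat) (hc : c < arr.length) :
    stepB arr k (dpBinv arr k c) (c : Int) = dpBinv arr k (c + 1) := by
  unfold stepB
  have hprev : (if (c : Int) > 0 then PySem.List.pyGetD (dpBinv arr k c) ((c : Int) - 1) 0 else 0)
      = (if c = 0 then 0 else valS arr k (c - 1)) := by
    rcases Nat.eq_zero_or_pos c with h0 | h0
    · subst h0; rfl
    · rw [if_pos (by omega), if_neg (by omega)]
      rw [show (c : Int) - 1 = ((c - 1 : Nat) : Int) by omega, PySem.List.pyGetD_natCast]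
      unfold dpBinv
      rw [getD_map_range' _ _ _ _ (by omega)]
      exact pvS_full arr k c (c - 1) (by omega)
  rw [hprev]
  have hrange : PySem.List.pyRange (c : Int) (min (arr.length : Int) ((c : Int) + k)) 1
      = (List.range ((min (arr.length : Int) ((c : Int) + k)) - (c : Int)).toNat).map
          (fun t : Nat => ((c + t : Nat) : Int)) := by
    rw [PySem.List.pyRange_one]
    apply List.map_congr_left
    intro t _
    push_cast
    ring
  rw [hrange]
  rw [innerB_partial arr k c hc _ rfl _ (by omega) (by omega)]
  show dpBmid arr k c _ = dpBinv arr k (c + 1)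
  unfold dpBmid dpBinv
  apply List.map_congr_left
  intro m hm
  rw [List.mem_range] at hm
  by_cases hwin : c ≤ m ∧ m < c + ((min (arr.length : Int) ((c : Int) + k)) - (c : Int)).toNat
  · rw [if_pos hwin]
  · rw [if_neg hwin]
    rw [pvS_succ_out arr k c m ?_]
    rcases Nat.lt_or_ge m c with hlt | hge
    · right; left; omega
    · rcases Nat.eq_zero_or_pos m with h0 | h0
      · left; exact h0
      · right; right
        omega

theorem portB_eq (arr : List Int) (k : Int) (h : arr ≠ []) :
    solve_tabulation_top_down_alt arr k = valS arr k (arr.length - 1) := by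
  have hn : 1 ≤ arr.length := List.length_pos_of_ne_nil h
  have hrfl : solve_tabulation_top_down_alt arr k
      = PySem.List.pyGetD
          ((PySem.List.pyRange 0 (arr.length : Int) 1).foldl (stepB arr k)
            (List.replicate arr.length (0 : Int))) (-1) 0 := rfl
  rw [hrfl]
  have hinit : List.replicate arr.length (0 : Int) = dpBinv arr k 0 := by
    apply List.ext_getElem
    · simp [dpBinv]
    · intro t ht1 ht2
      simp only [List.length_replicate] at ht1
      unfold dpBinv
      simp only [List.getElem_replicate, List.getElem_map, List.getElem_range]
      rw [pvS_zero]
  rw [hinit]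
  have houter : ∀ c, c ≤ arr.length →
      List.foldl (stepB arr k) (dpBinv arr k 0)
          ((List.range c).map (fun t : Nat => (t : Int)))
        = dpBinv arr k c := by
    intro c
    induction c with
    | zero => intro _; rfl
    | succ c ihc =>
      intro hcn
      rw [List.range_succ, List.map_append, List.foldl_append, ihc (by omega)]
      simp only [List.map_cons, List.map_nil, List.foldl_cons, List.foldl_nil]
      exact stepB_inv arr k c (by omega)
  have hrange : PySem.List.pyRange 0 (arr.length : Int) 1
      = (List.range arr.length).map (fun t : Nat => (t : Int)) := by
    rw [PySem.List.pyRange_one]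
    rw [show ((arr.length : Int) - 0).toNat = arr.length by omega]
    apply List.map_congr_left
    intro t _
    ring
  rw [hrange, houter arr.length le_rfl]
  have hne : dpBinv arr k arr.length ≠ [] := by
    intro hnil
    have := dpBinv_length arr k arr.length
    rw [hnil] at this
    simp at this
    omega
  rw [PySem.List.pyGetD_neg_one _ _ hne, List.getLast_eq_getElem]
  unfold dpBinv
  simp only [List.getElem_map, List.getElem_range, List.length_map, List.length_range]
  exact pvS_full arr k arr.length (arr.length - 1) (by omega)

-- ===== VERDICT (by name: the statement is the Claim_ definition above) =====
theorem solve_tabulation_top_down_spec : Claim_equal_solve_tabulation_top_down := by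
  intro arr k _ hpre
  unfold Spec_solve_tabulation_top_down
  rw [portA_eq arr k hpre, portB_eq arr k hpre]
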